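-- pv_equiv track=rewrite | github.com/somabencsik/AoC2025 | Day3/task2.py | get_next_valid_maximum
-- ===== SOURCE A (Python) =====
-- POSSIBLE_NUMBERS = list(range(1,10))
--
-- def get_next_valid_maximum(
--     bank: list[int],
--     numbers_left: int
-- ) -> tuple[int, int]:
--     """
--     Returns the next valid and biggest number's index and value
--     in the given bank.
--
--     Arguments
--     ---------
--     bank : list[int]
--         The list of joltages
--
--     numbers_left : int
--         Numbers left from the total joltage
--
--     Returns
--     -------
--     tuple[int, int]
--         Index of the biggest valid number and the value
--     """
--     highest_value_index = 0
--     for i in POSSIBLE_NUMBERS[::-1]: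
--         if i not in bank:
--             continue
--         if bank.index(i) + numbers_left >= len(bank):
--             continue
--         highest_value_index = bank.index(i)
--         break
--     return highest_value_index, bank[highest_value_index]
-- ===== SOURCE B (Python) =====
-- def get_next_valid_maximum(
--     bank: list[int],
--     numbers_left: int
-- ) -> tuple[int, int]:
--     limit = max(0, min(len(bank) - numbers_left, len(bank)))
--     best_index = 0
--     best_value = 0
--     for idx, v in enumerate(bank[:limit]):
--         if 1 <= v <= 9 and v > best_value:
--             best_index = idx
--             best_value = v
--     return best_index, bank[best_index]
-- ===== Notes on version B (the rewrite author's own statement) =====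
-- stated objective: simpler
-- what changed: Replaced A's descending loop over the nine candidate digit values (each doing an 'in' membership scan plus two .index() scans of the bank) by a single left-to-right pass over the eligible prefix bank[:len(bank)-numbers_left] that tracks the running maximum digit (1-9) and its first index.
import Mathlib
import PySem

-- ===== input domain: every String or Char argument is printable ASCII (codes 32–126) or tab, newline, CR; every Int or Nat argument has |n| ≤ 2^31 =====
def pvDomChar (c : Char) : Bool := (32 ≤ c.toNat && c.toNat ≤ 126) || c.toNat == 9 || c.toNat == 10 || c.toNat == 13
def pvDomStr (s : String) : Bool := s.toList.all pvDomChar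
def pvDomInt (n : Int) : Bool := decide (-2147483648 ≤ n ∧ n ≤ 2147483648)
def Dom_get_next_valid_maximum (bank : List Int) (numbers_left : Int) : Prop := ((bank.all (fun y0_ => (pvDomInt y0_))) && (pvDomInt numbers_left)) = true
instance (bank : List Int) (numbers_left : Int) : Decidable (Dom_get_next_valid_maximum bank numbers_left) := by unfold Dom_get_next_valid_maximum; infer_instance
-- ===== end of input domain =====

-- B replaces A's descending scan over the nine candidate values (each with its own
-- membership test and index() scans) by a single left-to-right pass over the eligible
-- prefix of the bank, tracking the running maximum digit and its first index.  Objective: simpler.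

-- ===== PORT A =====
-- the loop body of A: for i in POSSIBLE_NUMBERS[::-1]: … (break returns the index)
def pvAloop (bank : List Int) (numbers_left : Int) : List Int → Int
  | [] => 0
  | i :: rest =>
    if ¬ bank.contains i then pvAloop bank numbers_left rest
    else
      -- bank.index(i); the membership guard makes the ValueError (= none) branch unreachable
      let idx := (PySem.List.index? bank i).getD 0
      if (idx : Int) + numbers_left ≥ (bank.length : Int) then pvAloop bank numbers_left rest
      else (idx : Int)

def get_next_valid_maximum (bank : List Int) (numbers_left : Int) : Int × Int :=
  let possible_numbers := PySem.List.pyRange 1 10 1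
  let rev := (PySem.List.slice? possible_numbers none none (-1)).getD []   -- [::-1]; step ≠ 0, never none
  let highest_value_index := pvAloop bank numbers_left rev
  -- bank[highest_value_index]: IndexError (= none) only for bank = [], excluded by Pre_
  (highest_value_index, (PySem.List.pyGet? bank highest_value_index).getD 0)

-- ===== PORT B =====
-- the loop of Source B: for idx, v in enumerate(bank[:limit]) maintaining (best_index, best_value)
def pvBstep (st : Int × Int) (p : Int × Int) : Int × Int :=
  if 1 ≤ p.2 ∧ p.2 ≤ 9 ∧ st.2 < p.2 then (p.1, p.2) else st

def get_next_valid_maximum_alt (bank : List Int) (numbers_left : Int) : Int × Int :=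
  let limit : Int := max 0 (min ((bank.length : Int) - numbers_left) (bank.length : Int))
  let st := (PySem.List.enumerate (PySem.List.slice bank none (some limit)) 0).foldl pvBstep (0, 0)
  -- bank[best_index]: IndexError (= none) only for bank = [], excluded by Pre_
  (st.1, (PySem.List.pyGet? bank st.1).getD 0)

-- ===== PRECONDITION & SPEC =====
-- Pre_ excludes only the empty bank, on which Python's final bank[highest_value_index]
-- (resp. bank[best_index]) raises IndexError in both A and B.
def Pre_get_next_valid_maximum (bank : List Int) (numbers_left : Int) : Prop := bank ≠ []
instance (bank : List Int) (numbers_left : Int) : Decidable (Pre_get_next_valid_maximum bank numbers_left) := by unfold Pre_get_next_valid_maximum; infer_instance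

def pvWitness_get_next_valid_maximum : List Int × Int := ([3, 7, 2], 1)

def Spec_get_next_valid_maximum (bank : List Int) (numbers_left : Int) (out : Int × Int) : Prop := out = get_next_valid_maximum_alt bank numbers_left
instance (bank : List Int) (numbers_left : Int) (out : Int × Int) : Decidable (Spec_get_next_valid_maximum bank numbers_left out) := by unfold Spec_get_next_valid_maximum; infer_instance

-- ===== CLAIM (what is proved, stated in full; the proofs are below) =====
def Claim_equal_get_next_valid_maximum : Prop := ∀ (bank : List Int) (numbers_left : Int), Dom_get_next_valid_maximum bank numbers_left → Pre_get_next_valid_maximum bank numbers_left → Spec_get_next_valid_maximum bank numbers_left (get_next_valid_maximum bank numbers_left)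

-- ===== LEMMAS AND PROOFS =====

-- running maximum of the digit values (1..9) of a list, seeded with bv
def pvRunmax (l : List Int) (bv : Int) : Int :=
  l.foldl (fun a v => if 1 ≤ v ∧ v ≤ 9 ∧ a < v then v else a) bv

theorem pvRunmax_nil (bv : Int) : pvRunmax [] bv = bv := rfl

theorem pvRunmax_cons (v : Int) (l : List Int) (bv : Int) :
    pvRunmax (v :: l) bv = pvRunmax l (if 1 ≤ v ∧ v ≤ 9 ∧ bv < v then v else bv) := by
  simp [pvRunmax, List.foldl]

theorem pvRunmax_le (l : List Int) : ∀ bv : Int, bv ≤ pvRunmax l bv := by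
  induction l with
  | nil => intro bv; simp [pvRunmax_nil]
  | cons v rest ih =>
      intro bv
      rw [pvRunmax_cons]
      split_ifs with h
      · exact le_trans (le_of_lt h.2.2) (ih v)
      · exact ih bv

theorem pvRunmax_good (l : List Int) : ∀ bv : Int,
    pvRunmax l bv = bv ∨ (pvRunmax l bv ∈ l ∧ 1 ≤ pvRunmax l bv ∧ pvRunmax l bv ≤ 9) := by
  induction l with
  | nil => intro bv; left; rfl
  | cons v rest ih =>
      intro bv
      rw [pvRunmax_cons]
      split_ifs with h
      · rcases ih v with h1 | h1
        · right; rw [h1]; exact ⟨List.mem_cons_self, h.1, h.2.1⟩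
        · right; exact ⟨List.mem_cons_of_mem _ h1.1, h1.2⟩
      · rcases ih bv with h1 | h1
        · left; exact h1
        · right; exact ⟨List.mem_cons_of_mem _ h1.1, h1.2⟩

theorem pvRunmax_ub (l : List Int) : ∀ bv v : Int, v ∈ l → 1 ≤ v → v ≤ 9 → v ≤ pvRunmax l bv := by
  induction l with
  | nil => intro bv v hv; simp at hv
  | cons x rest ih =>
      intro bv v hv h1 h9
      rw [pvRunmax_cons]
      rcases List.mem_cons.mp hv with rfl | hv
      · split_ifs with h
        · exact pvRunmax_le rest v
        · have : ¬ bv < v := by tauto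
          exact le_trans (le_of_not_gt this) (pvRunmax_le rest bv)
      · split_ifs with h <;> exact ih _ v hv h1 h9

-- B's fold computes the running max together with the first index where it is attained
theorem pvBscan_spec (l : List Int) : ∀ (s bi bv : Int),
    (PySem.List.enumerate l s).foldl pvBstep (bi, bv) =
      if bv < pvRunmax l bv then (s + (List.idxOf (pvRunmax l bv) l : Int), pvRunmax l bv)
      else (bi, bv) := by
  induction l with
  | nil => intro s bi bv; simp [PySem.List.enumerate_nil, pvRunmax_nil]
  | cons v rest ih =>
      intro s bi bv
      rw [PySem.List.enumerate_cons, List.foldl_cons, pvRunmax_cons]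
      show (PySem.List.enumerate rest (s+1)).foldl pvBstep (pvBstep (bi, bv) (s, v)) = _
      by_cases hg : 1 ≤ v ∧ v ≤ 9 ∧ bv < v
      · have hstep : pvBstep (bi, bv) (s, v) = (s, v) := by simp [pvBstep, hg]
        rw [hstep, if_pos hg, ih (s+1) s v]
        have hle : v ≤ pvRunmax rest v := pvRunmax_le rest v
        by_cases hlt : v < pvRunmax rest v
        · rw [if_pos hlt, if_pos (lt_of_lt_of_le hg.2.2 hle)]
          have hne : (v == pvRunmax rest v) = false := by
            simp only [beq_eq_false_iff_ne]
            exact ne_of_lt hlt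
          rw [List.idxOf_cons, hne]
          simp only [cond_false]
          simp only [Prod.mk.injEq, and_true]
          push_cast
          ring
        · have heq : pvRunmax rest v = v := le_antisymm (le_of_not_gt hlt) hle
          rw [if_neg hlt, if_pos (by rw [heq]; exact hg.2.2), heq]
          rw [List.idxOf_cons_self]
          simp
      · have hstep : pvBstep (bi, bv) (s, v) = (bi, bv) := by simp [pvBstep, hg]
        rw [hstep, if_neg hg, ih (s+1) bi bv]
        by_cases hlt : bv < pvRunmax rest bv
        · rw [if_pos hlt, if_pos hlt]
          have hm : pvRunmax rest bv ∈ rest ∧ 1 ≤ pvRunmax rest bv ∧ pvRunmax rest bv ≤ 9 := by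
            rcases pvRunmax_good rest bv with h | h
            · omega
            · exact h
          have hvne : v ≠ pvRunmax rest bv := by
            rintro rfl
            exact hg ⟨hm.2.1, hm.2.2, hlt⟩
          have hne : (v == pvRunmax rest bv) = false := by simp [hvne]
          rw [List.idxOf_cons, hne]
          simp only [cond_false]
          simp only [Prod.mk.injEq, and_true]
          push_cast
          ring
        · rw [if_neg hlt, if_neg hlt]

-- index? on a take-prefix vs on the full list
theorem pv_index?_take (l : List Int) (v : Int) (n k : Nat) :
    PySem.List.index? (l.take n) v = some k ↔ PySem.List.index? l v = some k ∧ k < n := by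
  rw [PySem.List.index?_eq_idxOf?, PySem.List.index?_eq_idxOf?, List.idxOf?_eq_some_iff,
    List.idxOf?_eq_some_iff]
  constructor
  · rintro ⟨h, he, hmin⟩
    have hk : k < l.length ∧ k < n := by
      have h' := h
      simp only [List.length_take] at h'
      omega
    refine ⟨⟨hk.1, ?_, ?_⟩, hk.2⟩
    · rw [← List.getElem_take (h := h)]
      exact he
    · intro j hj
      have := hmin j hj
      rwa [List.getElem_take] at this
  · rintro ⟨⟨h, he, hmin⟩, hkn⟩
    have ht : k < (l.take n).length := by
      simp only [List.length_take]
      omega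
    refine ⟨ht, ?_, ?_⟩
    · rw [List.getElem_take]
      exact he
    · intro j hj
      rw [List.getElem_take]
      exact hmin j hj

theorem pv_index?_of_mem (l : List Int) (v : Int) (hv : v ∈ l) :
    PySem.List.index? l v = some (List.idxOf v l) := by
  induction l with
  | nil => simp at hv
  | cons x rest ih =>
      by_cases hx : x = v
      · subst hx
        rw [PySem.List.index?_cons_self, List.idxOf_cons_self]
      · have hvr : v ∈ rest := by
          rcases List.mem_cons.mp hv with rfl | h
          · exact absurd rfl hx
          · exact h
        rw [PySem.List.index?_cons_of_ne rest hx, List.idxOf_cons, ih hvr]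
        have hbe : (x == v) = false := by
          simp only [beq_eq_false_iff_ne]
          exact hx
        rw [hbe]
        rfl

-- A's loop skips every value it visits when no visit can fire
theorem pvAloop_skip_all (bank : List Int) (nl : Int) (vals : List Int)
    (H : ∀ i ∈ vals, ∀ idx : Nat, PySem.List.index? bank i = some idx → (idx : Int) + nl ≥ (bank.length : Int)) :
    pvAloop bank nl vals = 0 := by
  induction vals with
  | nil => rfl
  | cons i rest ih =>
      rw [pvAloop]
      by_cases hc : bank.contains i
      · rw [if_neg (by simpa using hc)]
        have hmem : i ∈ bank := by simpa using hc
        simp only [pv_index?_of_mem bank i hmem, Option.getD_some]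
        rw [if_pos (H i List.mem_cons_self _ (pv_index?_of_mem bank i hmem))]
        exact ih (fun j hj => H j (List.mem_cons_of_mem _ hj))
      · rw [if_pos (by simpa using hc)]
        exact ih (fun j hj => H j (List.mem_cons_of_mem _ hj))

-- A's loop returns the index of m, the first visited value that fires
theorem pvAloop_hit (bank : List Int) (nl : Int) (m : Int) (j : Nat)
    (hj : PySem.List.index? bank m = some j) (hfire : (j : Int) + nl < (bank.length : Int)) :
    ∀ vals : List Int, List.Pairwise (· > ·) vals → m ∈ vals →
    (∀ i ∈ vals, m < i → ∀ idx : Nat, PySem.List.index? bank i = some idx → (idx : Int) + nl ≥ (bank.length : Int)) →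
    pvAloop bank nl vals = (j : Int) := by
  intro vals
  induction vals with
  | nil => intro _ hm; simp at hm
  | cons i rest ih =>
      intro hpw hm H
      rw [pvAloop]
      by_cases him : i = m
      · subst him
        have hmem : i ∈ bank := (PySem.List.index?_isSome_iff bank i).mp (by rw [hj]; rfl)
        rw [if_neg (by simpa using hmem)]
        simp only [hj, Option.getD_some]
        rw [if_neg (by omega)]
      · have hmr : m ∈ rest := by
          rcases List.mem_cons.mp hm with rfl | h
          · exact absurd rfl him
          · exact h
        have hgt : m < i := (List.pairwise_cons.mp hpw).1 m hmr
        by_cases hc : bank.contains i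
        · rw [if_neg (by simpa using hc)]
          have hmem : i ∈ bank := by simpa using hc
          simp only [pv_index?_of_mem bank i hmem, Option.getD_some]
          rw [if_pos (H i List.mem_cons_self hgt _ (pv_index?_of_mem bank i hmem))]
          exact ih (List.pairwise_cons.mp hpw).2 hmr
            (fun k hk hmk => H k (List.mem_cons_of_mem _ hk) hmk)
        · rw [if_pos (by simpa using hc)]
          exact ih (List.pairwise_cons.mp hpw).2 hmr
            (fun k hk hmk => H k (List.mem_cons_of_mem _ hk) hmk)

-- ===== VERDICT (by name: the statement is the Claim_ definition above) =====
theorem get_next_valid_maximum_spec : Claim_equal_get_next_valid_maximum := by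
  intro bank nl _ _
  unfold Spec_get_next_valid_maximum get_next_valid_maximum get_next_valid_maximum_alt
  dsimp only
  have hrev : (PySem.List.slice? (PySem.List.pyRange 1 10 1) none none (-1)).getD [] =
      [9, 8, 7, 6, 5, 4, 3, 2, 1] := by decide
  rw [hrev]
  set limit : Int := max 0 (min ((bank.length : Int) - nl) (bank.length : Int)) with hlimit
  have hlim0 : 0 ≤ limit := le_max_left _ _
  have hslice : PySem.List.slice bank none (some limit) = bank.take limit.toNat :=
    PySem.List.slice_to bank hlim0
  rw [hslice, pvBscan_spec]
  set pfx := bank.take limit.toNat with hpfx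
  set m := pvRunmax pfx 0 with hm
  -- the two key bridges between A's per-value tests and the prefix
  have hbridge : ∀ (i : Int) (idx : Nat), PySem.List.index? bank i = some idx →
      ((idx : Int) + nl < (bank.length : Int) ↔ PySem.List.index? pfx i = some idx) := by
    intro i idx hidx
    rw [hpfx, pv_index?_take bank i limit.toNat idx]
    have hlt : idx < bank.length := by
      obtain ⟨hk, _, _⟩ := PySem.List.getElem_of_index?_eq_some hidx
      exact hk
    constructor
    · intro h
      exact ⟨hidx, by omega⟩
    · rintro ⟨_, h⟩
      omega
  by_cases hpos : 0 < m
  · -- a valid digit exists in the prefix; both return its first index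
    have hgood : m ∈ pfx ∧ 1 ≤ m ∧ m ≤ 9 := by
      rcases pvRunmax_good pfx 0 with h | h
      · omega
      · exact h
    have hmem_bank : m ∈ bank := List.mem_of_mem_take hgood.1
    set j := List.idxOf m pfx with hjdef
    have hjpfx : PySem.List.index? pfx m = some j := pv_index?_of_mem pfx m hgood.1
    have hjbank : PySem.List.index? bank m = some j := ((pv_index?_take bank m limit.toNat j).mp hjpfx).1
    have hfire : (j : Int) + nl < (bank.length : Int) := (hbridge m j hjbank).mpr hjpfx
    have hA : pvAloop bank nl [9, 8, 7, 6, 5, 4, 3, 2, 1] = (j : Int) := by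
      apply pvAloop_hit bank nl m j hjbank hfire _ (by decide)
      · have : 1 ≤ m ∧ m ≤ 9 := ⟨hgood.2.1, hgood.2.2⟩
        simp only [List.mem_cons, List.not_mem_nil, or_false]
        omega
      · intro i hi hmi idx hidx
        by_contra hlt
        push Not at hlt
        have hin : PySem.List.index? pfx i = some idx := (hbridge i idx hidx).mp hlt
        have hipfx : i ∈ pfx := (PySem.List.index?_isSome_iff pfx i).mp (by rw [hin]; rfl)
        have h19 : 1 ≤ i ∧ i ≤ 9 := by
          simp only [List.mem_cons, List.not_mem_nil, or_false] at hi
          omega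
        have := pvRunmax_ub pfx 0 i hipfx h19.1 h19.2
        omega
    rw [hA, if_pos hpos]
    simp
  · -- no valid digit in the prefix: both return index 0
    have hA : pvAloop bank nl [9, 8, 7, 6, 5, 4, 3, 2, 1] = 0 := by
      apply pvAloop_skip_all
      intro i hi idx hidx
      by_contra hlt
      push Not at hlt
      have hin : PySem.List.index? pfx i = some idx := (hbridge i idx hidx).mp hlt
      have hipfx : i ∈ pfx := (PySem.List.index?_isSome_iff pfx i).mp (by rw [hin]; rfl)
      have h19 : 1 ≤ i ∧ i ≤ 9 := by
        simp only [List.mem_cons, List.not_mem_nil, or_false] at hi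
        omega
      have := pvRunmax_ub pfx 0 i hipfx h19.1 h19.2
      omega
    rw [hA, if_neg (by omega)]
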